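-- pv_equiv track=rewrite | github.com/Samara-Ferreira/EXA854-HealthSearch | Codigos/funcoes.py | separarPalavras
-- ===== SOURCE A (Python) =====
-- def guardarPalavras(caminho_arquivo, dicionario, parte):
--     # Verifica se a chave já existe
--     if dicionario.get(parte):
--
--         # Se o caminho não existir
--         if dicionario[parte].get(caminho_arquivo) == None:
--             dicio_aux = {}
--             dicio_aux[caminho_arquivo] = 1
--             dicionario[parte].update(dicio_aux)
--
--         # Se o caminho já existir
--         else:
--             numero = dicionario[parte].get(caminho_arquivo)
--             numero = int(numero)
--             numero += 1
--             dicionario[parte][caminho_arquivo] = numero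
--
--     # Se a chave não existir
--     else:
--         dicio_aux = {}
--         dicio_aux[rf'{caminho_arquivo}'] = 1
--         dicionario[parte] = dicio_aux
--
--     return dicionario
--
-- def separarPalavras(caminho_arquivo, dicionario, leitura):
--     parte = ''  # Variável usada para armazenar as partes da linha até que formem uma palavra
--
--     for palavra in leitura:     # Percorre todas as partes da lista
--         if palavra == ' ' or palavra == '\n':
--
--             if parte != '':     # Quando uma palavra é formada
--                 dicionario = guardarPalavras(
--                     caminho_arquivo, dicionario, parte)
--                 parte = ''
--
--         else:
--             parte += palavra
--
--     return dicionario
-- ===== SOURCE B (Python) =====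
-- def guardarPalavras(caminho_arquivo, dicionario, parte):
--     # Verifica se a chave já existe
--     if dicionario.get(parte):
--
--         # Se o caminho não existir
--         if dicionario[parte].get(caminho_arquivo) == None:
--             dicio_aux = {}
--             dicio_aux[caminho_arquivo] = 1
--             dicionario[parte].update(dicio_aux)
--
--         # Se o caminho já existir
--         else:
--             numero = dicionario[parte].get(caminho_arquivo)
--             numero = int(numero)
--             numero += 1
--             dicionario[parte][caminho_arquivo] = numero
--
--     # Se a chave não existir
--     else:
--         dicio_aux = {}
--         dicio_aux[rf'{caminho_arquivo}'] = 1
--         dicionario[parte] = dicio_aux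
--
--     return dicionario
--
--
-- def separarPalavras(caminho_arquivo, dicionario, leitura):
--     # Materialize the tokens first: normalise '\n' to ' ', split on ' ', and drop
--     # the final segment (a trailing word not followed by a delimiter is not counted).
--     for parte in leitura.replace('\n', ' ').split(' ')[:-1]:
--         if parte != '':
--             dicionario = guardarPalavras(caminho_arquivo, dicionario, parte)
--     return dicionario
-- ===== Notes on version B (the rewrite author's own statement) =====
-- stated objective: idiomatic
-- what changed: Replaces the character-by-character streaming accumulator with a materialize-then-tokenize pass: normalise newlines to spaces, split the whole string on spaces, drop the last segment (reproducing that a trailing word not followed by a delimiter is not counted), and fold guardarPalavras over the non-empty tokens.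
import Mathlib
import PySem

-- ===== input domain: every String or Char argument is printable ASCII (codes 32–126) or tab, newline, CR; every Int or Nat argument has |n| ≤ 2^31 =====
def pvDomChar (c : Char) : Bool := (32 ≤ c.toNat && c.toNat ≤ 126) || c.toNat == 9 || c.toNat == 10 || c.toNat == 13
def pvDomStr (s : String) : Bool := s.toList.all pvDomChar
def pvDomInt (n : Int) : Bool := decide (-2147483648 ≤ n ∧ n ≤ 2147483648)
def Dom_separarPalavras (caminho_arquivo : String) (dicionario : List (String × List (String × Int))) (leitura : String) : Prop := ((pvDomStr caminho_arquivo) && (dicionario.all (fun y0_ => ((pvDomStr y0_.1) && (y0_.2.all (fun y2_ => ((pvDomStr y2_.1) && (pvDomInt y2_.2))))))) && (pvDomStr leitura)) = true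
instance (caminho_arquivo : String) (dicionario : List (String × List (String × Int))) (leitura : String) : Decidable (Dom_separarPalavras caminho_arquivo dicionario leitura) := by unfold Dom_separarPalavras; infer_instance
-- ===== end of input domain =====

-- B replaces A's character-by-character word accumulator with a materialize-then-tokenize pass
-- (normalise '\n' to ' ', split on ' ', drop the trailing segment, fold over non-empty tokens);
-- both Pythons mutate `dicionario` in place in the same way (same helper); the theorems are about the return value.

-- ===== PORT A =====
-- helper shared by Source A and Source B (Source B contains a verbatim copy of guardarPalavras)
def guardarPalavras (caminho_arquivo : String) (dicionario : List (String × List (String × Int))) (parte : String) : List (String × List (String × Int)) :=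
  match PySem.Dict.get? (PySem.Dict.mk dicionario) parte with
  | some inner =>
      if inner.isEmpty then
        -- `if dicionario.get(parte):` is falsy on an empty inner dict as well
        (PySem.Dict.insert (PySem.Dict.mk dicionario) parte [(caminho_arquivo, (1 : Int))]).items
      else
        match PySem.Dict.get? (PySem.Dict.mk inner) caminho_arquivo with
        | none => (PySem.Dict.insert (PySem.Dict.mk dicionario) parte (PySem.Dict.insert (PySem.Dict.mk inner) caminho_arquivo 1).items).items
        | some numero => (PySem.Dict.insert (PySem.Dict.mk dicionario) parte (PySem.Dict.insert (PySem.Dict.mk inner) caminho_arquivo (numero + 1)).items).items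
  | none => (PySem.Dict.insert (PySem.Dict.mk dicionario) parte [(caminho_arquivo, (1 : Int))]).items

-- the `for palavra in leitura:` loop, carrying `dicionario` and the accumulator `parte`
def sepLoop (caminho_arquivo : String) (dicionario : List (String × List (String × Int))) (parte : List Char) : List Char → List (String × List (String × Int))
  | [] => dicionario
  | palavra :: rest =>
      if palavra = ' ' ∨ palavra = '\n' then
        if parte ≠ [] then
          sepLoop caminho_arquivo (guardarPalavras caminho_arquivo dicionario (String.ofList parte)) [] rest
        else
          sepLoop caminho_arquivo dicionario parte rest
      else
        sepLoop caminho_arquivo dicionario (parte ++ [palavra]) rest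

def separarPalavras (caminho_arquivo : String) (dicionario : List (String × List (String × Int))) (leitura : String) : List (String × List (String × Int)) :=
  sepLoop caminho_arquivo dicionario [] leitura.toList

-- ===== PORT B =====
def separarPalavras_alt (caminho_arquivo : String) (dicionario : List (String × List (String × Int))) (leitura : String) : List (String × List (String × Int)) :=
  -- leitura.replace('\n', ' ').split(' ')[:-1], then the loop with the emptiness test
  (PySem.List.slice ((PySem.Chars.splitOn (PySem.Chars.replace leitura.toList ['\n'] [' ']) [' ']).map String.ofList) none (some (-1))).foldl
    (fun dicionario parte => if parte ≠ "" then guardarPalavras caminho_arquivo dicionario parte else dicionario)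
    dicionario

-- ===== PRECONDITION & SPEC =====
def Spec_separarPalavras (caminho_arquivo : String) (dicionario : List (String × List (String × Int))) (leitura : String) (out : List (String × List (String × Int))) : Prop := out = separarPalavras_alt caminho_arquivo dicionario leitura
instance (caminho_arquivo : String) (dicionario : List (String × List (String × Int))) (leitura : String) (out : List (String × List (String × Int))) : Decidable (Spec_separarPalavras caminho_arquivo dicionario leitura out) := by unfold Spec_separarPalavras; infer_instance

-- ===== CLAIM (what is proved, stated in full; the proofs are below) =====
def Claim_equal_separarPalavras : Prop := ∀ (caminho_arquivo : String) (dicionario : List (String × List (String × Int))) (leitura : String), Dom_separarPalavras caminho_arquivo dicionario leitura → Spec_separarPalavras caminho_arquivo dicionario leitura (separarPalavras caminho_arquivo dicionario leitura)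

-- ===== LEMMAS AND PROOFS =====

-- '\n' → ' ' as a character map
def pvRepl (c : Char) : Char := if c = '\n' then ' ' else c

-- split on ' ' as (first segment, remaining segments)
def pvSplit1 : List Char → (List Char × List (List Char))
  | [] => ([], [])
  | a :: rest => if a = ' ' then ([], (pvSplit1 rest).1 :: (pvSplit1 rest).2) else (a :: (pvSplit1 rest).1, (pvSplit1 rest).2)

-- the complete words A's streaming loop emits, starting with accumulator `parte`
def pvWords (parte : List Char) : List Char → List (List Char)
  | [] => []
  | c :: rest =>
      if c = ' ' ∨ c = '\n' then
        if parte ≠ [] then parte :: pvWords [] rest else pvWords [] rest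
      else pvWords (parte ++ [c]) rest

theorem sepLoop_eq_foldl_words (caminho_arquivo : String) (cs : List Char) :
    ∀ (d : List (String × List (String × Int))) (parte : List Char),
      sepLoop caminho_arquivo d parte cs =
        (pvWords parte cs).foldl (fun d w => guardarPalavras caminho_arquivo d (String.ofList w)) d := by
  induction cs with
  | nil => intro d parte; simp [sepLoop, pvWords]
  | cons c rest ih =>
      intro d parte
      by_cases hc : c = ' ' ∨ c = '\n'
      · by_cases hp : parte = []
        · simp [sepLoop, pvWords, hc, hp, ih]
        · simp [sepLoop, pvWords, hc, hp, ih]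
      · simp [sepLoop, pvWords, hc, ih]

theorem replace_go_newline (cs : List Char) :
    ∀ (fuel : Nat) (acc : List Char), cs.length ≤ fuel →
      PySem.Chars.replace.go ['\n'] [' '] fuel cs acc = acc.reverse ++ cs.map pvRepl := by
  induction cs with
  | nil => intro fuel acc _; cases fuel <;> simp [PySem.Chars.replace.go]
  | cons c rest ih =>
      intro fuel acc hlen
      match fuel with
      | fuel + 1 =>
        by_cases hc : c = '\n'
        · simp [PySem.Chars.replace.go, List.isPrefixOf, hc, pvRepl,
            ih fuel _ (by simpa using Nat.lt_succ_iff.mp (by simpa using hlen))]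
        · simp [PySem.Chars.replace.go, List.isPrefixOf, hc, Ne.symm hc, pvRepl,
            ih fuel _ (by simpa using Nat.lt_succ_iff.mp (by simpa using hlen))]

theorem replace_newline (cs : List Char) :
    PySem.Chars.replace cs ['\n'] [' '] = cs.map pvRepl := by
  simp [PySem.Chars.replace, replace_go_newline cs cs.length [] le_rfl]

theorem splitOn_go_space' (cs : List Char) :
    ∀ (fuel : Nat) (cur : List Char) (acc : List (List Char)), cs.length < fuel →
      PySem.Chars.splitOn.go [' '] fuel cs cur acc =
        acc.reverse ++ (cur.reverse ++ (pvSplit1 cs).1) :: (pvSplit1 cs).2 := by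
  induction cs with
  | nil =>
      intro fuel cur acc h
      match fuel with
      | fuel + 1 => simp [PySem.Chars.splitOn.go, pvSplit1]
  | cons c rest ih =>
      intro fuel cur acc h
      match fuel with
      | fuel + 1 =>
        have hrest : rest.length < fuel := by simpa using Nat.lt_succ_iff.mp (by simpa using h)
        by_cases hc : c = ' '
        · simp [PySem.Chars.splitOn.go, List.isPrefixOf, hc, pvSplit1, ih fuel _ _ hrest]
        · simp [PySem.Chars.splitOn.go, List.isPrefixOf, hc, Ne.symm hc, pvSplit1, ih fuel _ _ hrest,
            List.append_assoc]

theorem splitOn_space (cs : List Char) :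
    PySem.Chars.splitOn cs [' '] = (pvSplit1 cs).1 :: (pvSplit1 cs).2 := by
  simpa using splitOn_go_space' cs (cs.length + 1) [] [] (by omega)

theorem tokens_eq_words (cs : List Char) :
    ∀ (parte : List Char),
      (((parte ++ (pvSplit1 (cs.map pvRepl)).1) :: (pvSplit1 (cs.map pvRepl)).2).dropLast).filter
          (fun w => w ≠ []) = pvWords parte cs := by
  induction cs with
  | nil => intro parte; simp [pvSplit1, pvWords]
  | cons c rest ih =>
      intro parte
      simp only [ne_eq, decide_not] at ih ⊢
      by_cases hc : c = ' ' ∨ c = '\n'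
      · have hr : pvRepl c = ' ' := by rcases hc with h | h <;> simp [pvRepl, h]
        by_cases hp : parte = []
        · simpa [pvSplit1, pvWords, hr, hc, hp] using ih []
        · have := ih []
          simp only [List.nil_append] at this
          simp [pvSplit1, pvWords, hr, hc, hp, List.dropLast_cons_of_ne_nil, this]
      · rw [not_or] at hc
        have hr : pvRepl c = c := by simp [pvRepl, hc.2]
        have hcs : c ≠ ' ' := hc.1
        have := ih (parte ++ [c])
        simpa [pvSplit1, pvWords, hr, hcs, hc, List.append_assoc] using this
      
-- ===== VERDICT (by name: the statement is the Claim_ definition above) =====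
theorem separarPalavras_spec : Claim_equal_separarPalavras := by
  intro caminho_arquivo dicionario leitura _
  unfold Spec_separarPalavras separarPalavras separarPalavras_alt
  rw [replace_newline, splitOn_space]
  rw [PySem.List.slice_to_neg_one]
  rw [← List.map_dropLast, List.foldl_map]
  have hfilter :
      ∀ (L : List (List Char)) (d : List (String × List (String × Int))),
        L.foldl (fun d w => if String.ofList w ≠ "" then guardarPalavras caminho_arquivo d (String.ofList w) else d) d
          = (L.filter (fun w => w ≠ [])).foldl (fun d w => guardarPalavras caminho_arquivo d (String.ofList w)) d := by
    intro L d
    rw [List.foldl_filter]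
    congr 1
    funext d' w
    by_cases hw : w = []
    · simp [hw]
    · simp [hw]
  rw [hfilter]
  have htok := tokens_eq_words leitura.toList []
  simp only [List.nil_append] at htok
  rw [htok, ← sepLoop_eq_foldl_words]
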